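-- pv_equiv track=rewrite | github.com/DastaanDZ/DSA-in-Python | mxmodsum.py | mxmodsum
-- ===== SOURCE A (Python) =====
-- def mxmodsum(n,m,l):
--     count = []
--     if len(l)<=2:
--         for i in range(n):
--             for j in range(n):
--                 if l[i]-l[j]<0:
--                     count.append(l[i]+l[j]+(m-abs(l[i]-l[j])))
--                 else:
--                     count.append(l[i]+l[j]+((l[i]-l[j])%m))
--         return(max(count))
--     l.sort()
--     if l[len(l)-1]+l[len(l)-2]>m:
--         return(l[len(l)-1]+l[len(l)-2]+abs(l[len(l)-1]-l[len(l)-2])%m)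
--     else:
--         return(l[0]+l[1]+abs(l[0]-l[1])%m)
-- ===== SOURCE B (Python) =====
-- def mxmodsum(n, m, l):
--     if len(l) <= 2:
--         best = None
--         for i in range(n):
--             for j in range(n):
--                 d = l[i] - l[j]
--                 v = l[i] + l[j] + (m - abs(d) if d < 0 else d % m)
--                 if best is None or v > best:
--                     best = v
--         return best
--     mx1 = max(l)
--     rest = list(l)
--     rest.remove(mx1)
--     mx2 = max(rest)
--     if mx1 + mx2 > m:
--         return mx1 + mx2 + (mx1 - mx2) % m
--     mn1 = min(l)
--     restn = list(l)
--     restn.remove(mn1)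
--     mn2 = min(restn)
--     return mn1 + mn2 + (mn2 - mn1) % m
-- ===== Notes on version B (the rewrite author's own statement) =====
-- stated objective: alternative
-- what changed: B replaces A's full in-place sort of the list with direct linear extraction of the two largest / two smallest elements (max/min plus one removal), and in the small-list branch keeps a running maximum instead of materialising the list of all pair values; B does not mutate l (A sorts it in place).
import Mathlib
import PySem

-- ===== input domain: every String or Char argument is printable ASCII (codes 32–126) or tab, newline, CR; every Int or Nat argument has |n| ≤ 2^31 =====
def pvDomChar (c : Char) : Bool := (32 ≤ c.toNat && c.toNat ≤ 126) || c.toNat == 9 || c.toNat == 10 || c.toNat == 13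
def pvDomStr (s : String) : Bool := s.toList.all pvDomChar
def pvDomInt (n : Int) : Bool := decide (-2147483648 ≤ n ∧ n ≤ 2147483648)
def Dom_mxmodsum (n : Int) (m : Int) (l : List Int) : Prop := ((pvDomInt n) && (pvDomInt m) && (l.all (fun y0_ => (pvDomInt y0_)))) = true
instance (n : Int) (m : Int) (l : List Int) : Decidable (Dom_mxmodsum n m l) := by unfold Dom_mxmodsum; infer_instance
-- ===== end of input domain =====

-- B replaces A's in-place sort with a linear extraction of the two largest / two smallest
-- elements (max/min + one removal) and, in the small-list branch, a running maximum instead of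
-- a materialised list; equivalence is about the RETURN value only (Python A sorts l in place, B does not).

-- ===== PORT A =====
def mxmodsum (n : Int) (m : Int) (l : List Int) : Int :=
  if PySem.List.len l ≤ 2 then
    -- count = []; for i in range(n): for j in range(n): count.append(...); return max(count)
    let count := (PySem.List.pyRange 0 n 1).foldl (fun count i =>
      (PySem.List.pyRange 0 n 1).foldl (fun count j =>
        if PySem.List.pyGetD l i 0 - PySem.List.pyGetD l j 0 < 0 then
          count ++ [PySem.List.pyGetD l i 0 + PySem.List.pyGetD l j 0 +
            (m - |PySem.List.pyGetD l i 0 - PySem.List.pyGetD l j 0|)]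
        else
          count ++ [PySem.List.pyGetD l i 0 + PySem.List.pyGetD l j 0 +
            PySem.Int.mod (PySem.List.pyGetD l i 0 - PySem.List.pyGetD l j 0) m]) count) ([] : List Int)
    (PySem.List.max? count (fun x => x)).getD 0
  else
    -- l.sort(); then index the two ends
    let s := PySem.List.sorted l (fun x => x) false
    if PySem.List.pyGetD s (PySem.List.len l - 1) 0 + PySem.List.pyGetD s (PySem.List.len l - 2) 0 > m then
      PySem.List.pyGetD s (PySem.List.len l - 1) 0 + PySem.List.pyGetD s (PySem.List.len l - 2) 0 +
        PySem.Int.mod (|PySem.List.pyGetD s (PySem.List.len l - 1) 0 - PySem.List.pyGetD s (PySem.List.len l - 2) 0|) m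
    else
      PySem.List.pyGetD s 0 0 + PySem.List.pyGetD s 1 0 +
        PySem.Int.mod (|PySem.List.pyGetD s 0 0 - PySem.List.pyGetD s 1 0|) m

-- ===== PORT B =====
def mxmodsum_alt (n : Int) (m : Int) (l : List Int) : Int :=
  if PySem.List.len l ≤ 2 then
    -- running maximum over the same pair values (best = None; ... if best is None or v > best)
    let best := (PySem.List.pyRange 0 n 1).foldl (fun best i =>
      (PySem.List.pyRange 0 n 1).foldl (fun best j =>
        let d := PySem.List.pyGetD l i 0 - PySem.List.pyGetD l j 0
        let v := PySem.List.pyGetD l i 0 + PySem.List.pyGetD l j 0 +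
          (if d < 0 then m - |d| else PySem.Int.mod d m)
        match best with
        | none => some v
        | some b0 => if v > b0 then some v else some b0) best) (none : Option Int)
    best.getD 0
  else
    let mx1 := (PySem.List.max? l (fun x => x)).getD 0
    let rest := (PySem.List.remove? l mx1).getD l
    let mx2 := (PySem.List.max? rest (fun x => x)).getD 0
    if mx1 + mx2 > m then
      mx1 + mx2 + PySem.Int.mod (mx1 - mx2) m
    else
      let mn1 := (PySem.List.min? l (fun x => x)).getD 0
      let restn := (PySem.List.remove? l mn1).getD l
      let mn2 := (PySem.List.min? restn (fun x => x)).getD 0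
      mn1 + mn2 + PySem.Int.mod (mn2 - mn1) m

-- ===== PRECONDITION & SPEC =====
-- Pre_ excludes exactly the inputs where Python A raises: m = 0 (ZeroDivisionError in '% m'),
-- and in the len(l) <= 2 branch n < 1 (max of the empty count list: ValueError) or
-- n > len(l) (IndexError on l[i]).
def Pre_mxmodsum (n : Int) (m : Int) (l : List Int) : Prop :=
  m ≠ 0 ∧ ((l.length : Int) ≤ 2 → (1 ≤ n ∧ n ≤ (l.length : Int)))
instance (n : Int) (m : Int) (l : List Int) : Decidable (Pre_mxmodsum n m l) := by
  unfold Pre_mxmodsum; infer_instance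

def pvWitness_mxmodsum : Int × Int × List Int := (2, 5, [1, 3, 7, 2])

def Spec_mxmodsum (n : Int) (m : Int) (l : List Int) (out : Int) : Prop := out = mxmodsum_alt n m l
instance (n : Int) (m : Int) (l : List Int) (out : Int) : Decidable (Spec_mxmodsum n m l out) := by unfold Spec_mxmodsum; infer_instance

-- ===== CLAIM (what is proved, stated in full; the proofs are below) =====
def Claim_equal_mxmodsum : Prop := ∀ (n : Int) (m : Int) (l : List Int), Dom_mxmodsum n m l → Pre_mxmodsum n m l → Spec_mxmodsum n m l (mxmodsum n m l)

-- ===== LEMMAS AND PROOFS =====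

-- the first maximal element of c ++ [v] as a function of the first maximal element of c
lemma max?_append_singleton_int (c : List Int) (v : Int) :
    PySem.List.max? (c ++ [v]) (fun x => x) =
      some (match PySem.List.max? c (fun x => x) with
            | none => v
            | some b => if v > b then v else b) := by
  cases h : PySem.List.max? c (fun x => x) with
  | none =>
      have hc : c = [] := (PySem.List.max?_eq_none_iff c (fun x => x)).mp h
      subst hc
      simpa using PySem.List.max?_id_cons (x := v) (t := [])
  | some b =>
      have hbmem : b ∈ c := PySem.List.max?_mem h
      have hbmax : ∀ y ∈ c, y ≤ b := fun y hy => PySem.List.max?_isMax h y hy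
      have hne : c ++ [v] ≠ [] := by simp
      cases h2 : PySem.List.max? (c ++ [v]) (fun x => x) with
      | none =>
          exact absurd ((PySem.List.max?_eq_none_iff (c ++ [v]) (fun x => x)).mp h2) hne
      | some w =>
          have hwmem : w ∈ c ++ [v] := PySem.List.max?_mem h2
          have hwmax : ∀ y ∈ c ++ [v], y ≤ w := fun y hy => PySem.List.max?_isMax h2 y hy
          have hbw : b ≤ w := hwmax b (by simp [hbmem])
          have hvw : v ≤ w := hwmax v (by simp)
          have hwub : w ≤ b ∨ w = v := by
            rcases List.mem_append.mp hwmem with hin | hin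
            · exact Or.inl (hbmax w hin)
            · exact Or.inr (by simpa using hin)
          simp only [Option.some.injEq]
          by_cases hvb : v > b
          · simp only [if_pos hvb]; omega
          · simp only [if_neg hvb]; omega

-- fold homomorphism: max? of a list built by a fold equals the fold of the option-level steps
lemma max?_foldl_hom (rng : List Int) (G : List Int → Int → List Int)
    (H : Option Int → Int → Option Int)
    (h : ∀ c x, PySem.List.max? (G c x) (fun y => y) = H (PySem.List.max? c (fun y => y)) x) :
    ∀ c0 : List Int,
      PySem.List.max? (rng.foldl G c0) (fun y => y) = rng.foldl H (PySem.List.max? c0 (fun y => y)) := by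
  induction rng with
  | nil => intro c0; rfl
  | cons x xs ih =>
      intro c0
      simp only [List.foldl_cons]
      rw [ih, h]

-- two largest values of l, read off a ≥-sorted permutation a :: b :: t of l
lemma max_pair_of_perm (l : List Int) (a b : Int) (t : List Int)
    (hperm : (a :: b :: t).Perm l)
    (hpw : (a :: b :: t).Pairwise (fun x y : Int => y ≤ x)) :
    PySem.List.max? l (fun x => x) = some a ∧
    PySem.List.remove? l a = some (l.erase a) ∧
    PySem.List.max? (l.erase a) (fun x => x) = some b := by
  have hal : a ∈ l := hperm.mem_iff.mp (by simp)
  have hmax : PySem.List.max? l (fun x => x) = some a := by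
    cases h : PySem.List.max? l (fun x => x) with
    | none =>
        have : l = [] := (PySem.List.max?_eq_none_iff l (fun x => x)).mp h
        simp [this] at hal
    | some w =>
        have hwmem : w ∈ l := PySem.List.max?_mem h
        have haw : a ≤ w := PySem.List.max?_isMax h a hal
        have hw' : w ∈ a :: b :: t := hperm.mem_iff.mpr hwmem
        have hwa : w ≤ a := by
          rcases List.mem_cons.mp hw' with h' | hw''
          · omega
          · have := (List.pairwise_cons.mp hpw).1 w hw''
            omega
        simp [le_antisymm hwa haw]
  refine ⟨hmax, PySem.List.remove?_eq_some_erase l a hal, ?_⟩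
  have hperm2 : (b :: t).Perm (l.erase a) := by
    have := hperm.erase a
    simpa using this
  have hpw2 : (b :: t).Pairwise (fun x y : Int => y ≤ x) := (List.pairwise_cons.mp hpw).2
  have hbl : b ∈ l.erase a := hperm2.mem_iff.mp (by simp)
  cases h : PySem.List.max? (l.erase a) (fun x => x) with
  | none =>
      have : l.erase a = [] := (PySem.List.max?_eq_none_iff (l.erase a) (fun x => x)).mp h
      simp [this] at hbl
  | some w =>
      have hwmem : w ∈ l.erase a := PySem.List.max?_mem h
      have hbw : b ≤ w := PySem.List.max?_isMax h b hbl
      have hw' : w ∈ b :: t := hperm2.mem_iff.mpr hwmem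
      have hwb : w ≤ b := by
        rcases List.mem_cons.mp hw' with h' | hw''
        · omega
        · have := (List.pairwise_cons.mp hpw2).1 w hw''
          omega
      simp [le_antisymm hwb hbw]

-- two smallest values of l, read off a ≤-sorted permutation a :: b :: t of l
lemma min_pair_of_perm (l : List Int) (a b : Int) (t : List Int)
    (hperm : (a :: b :: t).Perm l)
    (hpw : (a :: b :: t).Pairwise (fun x y : Int => x ≤ y)) :
    PySem.List.min? l (fun x => x) = some a ∧
    PySem.List.remove? l a = some (l.erase a) ∧
    PySem.List.min? (l.erase a) (fun x => x) = some b := by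
  have hal : a ∈ l := hperm.mem_iff.mp (by simp)
  have hmin : PySem.List.min? l (fun x => x) = some a := by
    cases h : PySem.List.min? l (fun x => x) with
    | none =>
        have : l = [] := (PySem.List.min?_eq_none_iff l (fun x => x)).mp h
        simp [this] at hal
    | some w =>
        have hwmem : w ∈ l := PySem.List.min?_mem h
        have haw : w ≤ a := PySem.List.min?_isMin h a hal
        have hw' : w ∈ a :: b :: t := hperm.mem_iff.mpr hwmem
        have hwa : a ≤ w := by
          rcases List.mem_cons.mp hw' with h' | hw''
          · omega
          · have := (List.pairwise_cons.mp hpw).1 w hw''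
            omega
        simp [le_antisymm haw hwa]
  refine ⟨hmin, PySem.List.remove?_eq_some_erase l a hal, ?_⟩
  have hperm2 : (b :: t).Perm (l.erase a) := by
    have := hperm.erase a
    simpa using this
  have hpw2 : (b :: t).Pairwise (fun x y : Int => x ≤ y) := (List.pairwise_cons.mp hpw).2
  have hbl : b ∈ l.erase a := hperm2.mem_iff.mp (by simp)
  cases h : PySem.List.min? (l.erase a) (fun x => x) with
  | none =>
      have : l.erase a = [] := (PySem.List.min?_eq_none_iff (l.erase a) (fun x => x)).mp h
      simp [this] at hbl
  | some w =>
      have hwmem : w ∈ l.erase a := PySem.List.min?_mem h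
      have hbw : w ≤ b := PySem.List.min?_isMin h b hbl
      have hw' : w ∈ b :: t := hperm2.mem_iff.mpr hwmem
      have hwb : b ≤ w := by
        rcases List.mem_cons.mp hw' with h' | hw''
        · omega
        · have := (List.pairwise_cons.mp hpw2).1 w hw''
          omega
      simp [le_antisymm hbw hwb]

-- pushing `some` through the running-max step
lemma optstep_some_eq (o : Option Int) (v : Int) :
    some (match o with | none => v | some b => if v > b then v else b)
    = match o with | none => some v | some b0 => if v > b0 then some v else some b0 := by
  cases o with
  | none => rfl
  | some b => by_cases h : v > b <;> simp [h]

-- the small branch: the running maximum of B equals max? of the pair list A builds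
lemma small_branch_eq (n m : Int) (l : List Int) :
    PySem.List.max?
      ((PySem.List.pyRange 0 n 1).foldl (fun count i =>
        (PySem.List.pyRange 0 n 1).foldl (fun count j =>
          if PySem.List.pyGetD l i 0 - PySem.List.pyGetD l j 0 < 0 then
            count ++ [PySem.List.pyGetD l i 0 + PySem.List.pyGetD l j 0 +
              (m - |PySem.List.pyGetD l i 0 - PySem.List.pyGetD l j 0|)]
          else
            count ++ [PySem.List.pyGetD l i 0 + PySem.List.pyGetD l j 0 +
              PySem.Int.mod (PySem.List.pyGetD l i 0 - PySem.List.pyGetD l j 0) m]) count)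
        ([] : List Int)) (fun x => x)
    = (PySem.List.pyRange 0 n 1).foldl (fun best i =>
        (PySem.List.pyRange 0 n 1).foldl (fun best j =>
          let d := PySem.List.pyGetD l i 0 - PySem.List.pyGetD l j 0
          let v := PySem.List.pyGetD l i 0 + PySem.List.pyGetD l j 0 +
            (if d < 0 then m - |d| else PySem.Int.mod d m)
          match best with
          | none => some v
          | some b0 => if v > b0 then some v else some b0) best) (none : Option Int) := by
  have hstep : ∀ (i : Int) (c : List Int) (j : Int),
      PySem.List.max?
        ((fun c j =>
          if PySem.List.pyGetD l i 0 - PySem.List.pyGetD l j 0 < 0 then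
            c ++ [PySem.List.pyGetD l i 0 + PySem.List.pyGetD l j 0 +
              (m - |PySem.List.pyGetD l i 0 - PySem.List.pyGetD l j 0|)]
          else
            c ++ [PySem.List.pyGetD l i 0 + PySem.List.pyGetD l j 0 +
              PySem.Int.mod (PySem.List.pyGetD l i 0 - PySem.List.pyGetD l j 0) m]) c j) (fun y => y)
      = (fun best j =>
          let d := PySem.List.pyGetD l i 0 - PySem.List.pyGetD l j 0
          let v := PySem.List.pyGetD l i 0 + PySem.List.pyGetD l j 0 +
            (if d < 0 then m - |d| else PySem.Int.mod d m)
          match best with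
          | none => some v
          | some b0 => if v > b0 then some v else some b0)
          (PySem.List.max? c (fun y => y)) j := by
    intro i c j
    by_cases hd : PySem.List.pyGetD l i 0 - PySem.List.pyGetD l j 0 < 0
    · simp only [if_pos hd]
      rw [max?_append_singleton_int, optstep_some_eq]
    · simp only [if_neg hd]
      rw [max?_append_singleton_int, optstep_some_eq]
  have hinner : ∀ (i : Int) (c : List Int),
      PySem.List.max?
        ((PySem.List.pyRange 0 n 1).foldl (fun c j =>
          if PySem.List.pyGetD l i 0 - PySem.List.pyGetD l j 0 < 0 then
            c ++ [PySem.List.pyGetD l i 0 + PySem.List.pyGetD l j 0 +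
              (m - |PySem.List.pyGetD l i 0 - PySem.List.pyGetD l j 0|)]
          else
            c ++ [PySem.List.pyGetD l i 0 + PySem.List.pyGetD l j 0 +
              PySem.Int.mod (PySem.List.pyGetD l i 0 - PySem.List.pyGetD l j 0) m]) c) (fun y => y)
      = (PySem.List.pyRange 0 n 1).foldl (fun best j =>
          let d := PySem.List.pyGetD l i 0 - PySem.List.pyGetD l j 0
          let v := PySem.List.pyGetD l i 0 + PySem.List.pyGetD l j 0 +
            (if d < 0 then m - |d| else PySem.Int.mod d m)
          match best with
          | none => some v
          | some b0 => if v > b0 then some v else some b0) (PySem.List.max? c (fun y => y)) :=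
    fun i => max?_foldl_hom (PySem.List.pyRange 0 n 1) _ _ (hstep i)
  have houter := max?_foldl_hom (PySem.List.pyRange 0 n 1)
    (fun count i =>
      (PySem.List.pyRange 0 n 1).foldl (fun count j =>
        if PySem.List.pyGetD l i 0 - PySem.List.pyGetD l j 0 < 0 then
          count ++ [PySem.List.pyGetD l i 0 + PySem.List.pyGetD l j 0 +
            (m - |PySem.List.pyGetD l i 0 - PySem.List.pyGetD l j 0|)]
        else
          count ++ [PySem.List.pyGetD l i 0 + PySem.List.pyGetD l j 0 +
            PySem.Int.mod (PySem.List.pyGetD l i 0 - PySem.List.pyGetD l j 0) m]) count)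
    (fun best i =>
      (PySem.List.pyRange 0 n 1).foldl (fun best j =>
        let d := PySem.List.pyGetD l i 0 - PySem.List.pyGetD l j 0
        let v := PySem.List.pyGetD l i 0 + PySem.List.pyGetD l j 0 +
          (if d < 0 then m - |d| else PySem.Int.mod d m)
        match best with
        | none => some v
        | some b0 => if v > b0 then some v else some b0) best)
    (fun c i => hinner i c) ([] : List Int)
  simpa using houter

-- ===== VERDICT (by name: the statement is the Claim_ definition above) =====
theorem mxmodsum_spec : Claim_equal_mxmodsum := by
  intro n m l _hdom _hpre
  unfold Spec_mxmodsum mxmodsum mxmodsum_alt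
  simp only [PySem.List.len_eq]
  by_cases hlen : (l.length : Int) ≤ 2
  · simp only [if_pos hlen]
    rw [small_branch_eq n m l]
  · simp only [if_neg hlen]
    have hk : 3 ≤ l.length := by omega
    set s := PySem.List.sorted l (fun x => x) false with hsdef
    have hsl : s.length = l.length := PySem.List.length_sorted l (fun x => x) false
    have hperm : s.Perm l := PySem.List.sorted_perm l (fun x => x) false
    have hpw : s.Pairwise (fun a b : Int => a ≤ b) := PySem.List.sorted_pairwise l (fun x => x)
    -- destructure s and its reverse
    obtain ⟨a, b, t, hs⟩ : ∃ a b t, s = a :: b :: t := by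
      match s, hsl with
      | x :: y :: t, _ => exact ⟨x, y, t, rfl⟩
      | [], h => simp at h; omega
      | [x], h => simp at h; omega
    obtain ⟨p, q, u, hr⟩ : ∃ p q u, s.reverse = p :: q :: u := by
      have : s.reverse.length = l.length := by simp [hsl]
      match hh : s.reverse, this with
      | x :: y :: t, _ => exact ⟨x, y, t, rfl⟩
      | [], h => simp at h; omega
      | [x], h => simp at h; omega
    have hpermr : (p :: q :: u).Perm l := hr ▸ (s.reverse_perm.trans hperm)
    have hpwr : (p :: q :: u).Pairwise (fun x y : Int => y ≤ x) := by
      rw [← hr]; exact List.pairwise_reverse.mpr hpw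
    obtain ⟨hmax1, hrem, hmax2⟩ := max_pair_of_perm l p q u hpermr hpwr
    obtain ⟨hmin1, hremn, hmin2⟩ := min_pair_of_perm l a b t (hs ▸ hperm) (hs ▸ hpw)
    -- A's four indexed reads
    have e0 : PySem.List.pyGetD s 0 0 = a := by rw [hs, PySem.List.pyGetD_zero_cons]
    have e1 : PySem.List.pyGetD s 1 0 = b := by
      rw [hs]; simp [PySem.List.pyGetD, PySem.List.pyGet?, PySem.List.pyIdx?]
    have elast : PySem.List.pyGetD s ((l.length : Int) - 1) 0 = p := by
      rw [show ((l.length : Int) - 1) = ((l.length - 1 : Nat) : Int) by omega,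
        PySem.List.pyGetD_natCast, List.getD_eq_getElem?_getD]
      have h0 : s.reverse[0]? = some p := by rw [hr]; rfl
      rw [List.getElem?_reverse (by omega)] at h0
      have h1 : s.length - 1 - 0 = l.length - 1 := by omega
      rw [h1] at h0
      rw [h0]; rfl
    have esnd : PySem.List.pyGetD s ((l.length : Int) - 2) 0 = q := by
      rw [show ((l.length : Int) - 2) = ((l.length - 2 : Nat) : Int) by omega,
        PySem.List.pyGetD_natCast, List.getD_eq_getElem?_getD]
      have h0 : s.reverse[1]? = some q := by rw [hr]; rfl
      rw [List.getElem?_reverse (by omega)] at h0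
      have h1 : s.length - 1 - 1 = l.length - 2 := by omega
      rw [h1] at h0
      rw [h0]; rfl
    -- order facts for the abs rewrites
    have hqp : q ≤ p := (List.pairwise_cons.mp hpwr).1 q (by simp)
    have hab : a ≤ b := (List.pairwise_cons.mp (hs ▸ hpw)).1 b (by simp)
    simp only [elast, esnd, e0, e1, hmax1, hrem, hmax2, hmin1, hremn, hmin2, Option.getD_some]
    by_cases hcond : p + q > m
    · rw [if_pos hcond, if_pos hcond, abs_of_nonneg (by omega : (0:Int) ≤ p - q)]
    · rw [if_neg hcond, if_neg hcond, abs_of_nonpos (by omega : a - b ≤ (0:Int)), neg_sub]
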